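-- pv_equiv track=rewrite | github.com/leemhyungyu/Baekjoon-Programmers | Programmers/Lv3/최고의 집합.py | solution
-- ===== SOURCE A (Python) =====
-- def solution(n, s):
--     answer = []
--
--     if n > s: return [-1]
--
--     num = s // n
--     rest = s % n
--
--     answer = [num for _ in range(n)]
--
--     if rest == 0: return answer
--
--     for i in range(len(answer)):
--         answer[i] += 1
--         rest -= 1
--         if rest == 0: break
--
--     answer.sort()
--     return answer
-- ===== SOURCE B (Python) =====
-- def solution(n, s):
--     # Construct the answer directly, already sorted: (n - rest) copies of num,
--     # then rest copies of num + 1.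
--     if n > s:
--         return [-1]
--     num, rest = divmod(s, n)
--     return [num] * (n - rest) + [num + 1] * rest
-- ===== Notes on version B (the rewrite author's own statement) =====
-- stated objective: faster
-- what changed: B builds the sorted result [num]*(n-rest)+[num+1]*rest in closed form, replacing A's build-then-increment loop followed by a sort.
-- outside the precondition, e.g. on solution(0, 5): A raises ZeroDivisionError, B raises ZeroDivisionError
import Mathlib
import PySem

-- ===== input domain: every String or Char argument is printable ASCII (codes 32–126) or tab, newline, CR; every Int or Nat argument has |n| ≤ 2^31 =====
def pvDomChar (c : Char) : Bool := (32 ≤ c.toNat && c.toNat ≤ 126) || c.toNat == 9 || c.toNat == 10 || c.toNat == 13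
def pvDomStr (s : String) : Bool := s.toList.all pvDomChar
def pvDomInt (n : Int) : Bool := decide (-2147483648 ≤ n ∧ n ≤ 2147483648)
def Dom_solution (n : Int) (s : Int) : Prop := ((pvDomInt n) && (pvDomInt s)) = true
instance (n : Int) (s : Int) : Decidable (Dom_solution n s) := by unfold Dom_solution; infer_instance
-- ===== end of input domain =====

-- B replaces A's build-then-increment loop plus sort by a closed-form already-sorted
-- construction [num]*(n-rest)+[num+1]*rest (objective: faster, O(n) vs O(n log n)).

-- ===== PORT A =====
-- the for-loop 'for i in range(len(answer)): answer[i] += 1; rest -= 1; if rest == 0: break'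
def solLoop : List Nat → List Int → Int → List Int
  | [], ans, _ => ans
  | i :: t, ans, rest =>
    let ans := PySem.List.pySetD ans (i : Int) (PySem.List.pyGetD ans (i : Int) 0 + 1)
    let rest := rest - 1
    if rest = 0 then ans else solLoop t ans rest

def solution (n : Int) (s : Int) : List Int :=
  if n > s then [-1]
  else
    let num := PySem.Int.floordiv s n
    let rest := PySem.Int.mod s n
    let answer := (PySem.List.pyRange 0 n 1).map (fun _ => num)
    if rest = 0 then answer
    else
      let answer := solLoop (List.range answer.length) answer rest
      PySem.List.sorted answer (fun x => x) false

-- ===== PORT B =====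
def solution_alt (n : Int) (s : Int) : List Int :=
  if n > s then [-1]
  else
    let num := PySem.Int.floordiv s n
    let rest := PySem.Int.mod s n
    List.replicate (n - rest).toNat num ++ List.replicate rest.toNat (num + 1)

-- ===== PRECONDITION & SPEC =====
-- Pre_ excludes only n = 0 with s ≥ 0, where A raises ZeroDivisionError (s // 0); B raises there too.
def Pre_solution (n : Int) (s : Int) : Prop := n > s ∨ n ≠ 0
instance (n : Int) (s : Int) : Decidable (Pre_solution n s) := by unfold Pre_solution; infer_instance
def pvWitness_solution : Int × Int := (3, 7)

def Spec_solution (n : Int) (s : Int) (out : List Int) : Prop := out = solution_alt n s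
instance (n : Int) (s : Int) (out : List Int) : Decidable (Spec_solution n s out) := by unfold Spec_solution; infer_instance

-- ===== CLAIM (what is proved, stated in full; the proofs are below) =====
def Claim_equal_solution : Prop := ∀ (n : Int) (s : Int), Dom_solution n s → Pre_solution n s → Spec_solution n s (solution n s)

-- ===== LEMMAS AND PROOFS =====

lemma rep_cons_shift (x : Int) (j m : Nat) (y : Int) :
    List.replicate j x ++ x :: List.replicate m y = x :: (List.replicate j x ++ List.replicate m y) := by
  induction j with
  | zero => rfl
  | succ k ih => simp only [List.replicate_succ, List.cons_append, ih]

-- loop invariant: after j increments the list is j copies of num+1 followed by m copies of num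
lemma solLoop_inv (num : Int) : ∀ (m j : Nat) (r : Int), 0 < r → r ≤ (m : Int) →
    solLoop (List.range' j m) (List.replicate j (num + 1) ++ List.replicate m num) r
      = List.replicate (j + r.toNat) (num + 1) ++ List.replicate (m - r.toNat) num := by
  intro m
  induction m with
  | zero => intro j r h1 h2; omega
  | succ m ih =>
    intro j r h1 h2
    rw [List.range'_succ]
    show (if r - 1 = 0 then _ else _) = _
    have hget : PySem.List.pyGetD
        (List.replicate j (num + 1) ++ List.replicate (m + 1) num) (j : Int) 0 = num := by
      rw [PySem.List.pyGetD_natCast]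
      simp [List.getD]
    have hset : PySem.List.pySetD
        (List.replicate j (num + 1) ++ List.replicate (m + 1) num) (j : Int) (num + 1)
        = List.replicate (j + 1) (num + 1) ++ List.replicate m num := by
      rw [PySem.List.pySetD_natCast, List.set_append_right _ _ (by simp)]
      simp only [List.length_replicate, Nat.sub_self, List.replicate_succ, List.set_cons_zero]
      exact rep_cons_shift (num + 1) j m num
    rw [hget, hset]
    by_cases hr : r - 1 = 0
    · simp only [hr, if_true]
      have h1 : r.toNat = 1 := by omega
      rw [h1]
      simp
    · simp only [hr, if_false]
      rw [ih (j + 1) (r - 1) (by omega) (by omega)]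
      have e1 : j + 1 + (r - 1).toNat = j + r.toNat := by omega
      have e2 : m - (r - 1).toNat = m + 1 - r.toNat := by omega
      rw [e1, e2]

-- the initial list [num for _ in range(n)] is replicate n.toNat num
lemma init_replicate (n num : Int) :
    (PySem.List.pyRange 0 n 1).map (fun _ => num) = List.replicate n.toNat num := by
  rw [PySem.List.pyRange_one, List.map_map]
  simp only [Function.comp_def]
  rw [List.map_const']
  simp

-- ===== VERDICT (by name: the statement is the Claim_ definition above) =====
theorem solution_spec : Claim_equal_solution := by
  intro n s _ hpre
  unfold Spec_solution solution solution_alt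
  by_cases hns : n > s
  · simp [hns]
  · simp only [hns, if_false]
    have hn0 : n ≠ 0 := by rcases hpre with h | h <;> omega
    set num := PySem.Int.floordiv s n with hnum
    set rest := PySem.Int.mod s n with hrest
    rcases lt_or_gt_of_ne hn0 with hneg | hpos
    · -- n < 0 : A's list is empty, and both of B's replicate counts are ≤ 0
      have hb := PySem.Int.mod_neg_bounds s hneg
      have h1 : (PySem.List.pyRange 0 n 1).map (fun _ => num) = [] := by
        rw [init_replicate]
        simp [Int.toNat_of_nonpos (le_of_lt hneg)]
      have h2 : (n - rest).toNat = 0 := by omega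
      have h3 : rest.toNat = 0 := by omega
      rw [h1, h2, h3]
      by_cases hr : rest = 0 <;> simp [hr, solLoop, PySem.List.sorted]
    · -- n > 0 : 0 ≤ rest < n
      have hb1 : 0 ≤ rest := PySem.Int.mod_nonneg s hpos
      have hb2 : rest < n := PySem.Int.mod_lt s hpos
      rw [init_replicate]
      by_cases hr : rest = 0
      · simp only [hr, if_true]
        simp
      · simp only [hr, if_false]
        have hlen : (List.replicate n.toNat num).length = n.toNat := by simp
        rw [hlen, List.range_eq_range']
        have := solLoop_inv num n.toNat 0 rest (by omega) (by omega)
        simp only [List.replicate_zero, List.nil_append, Nat.zero_add] at this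
        rw [this]
        apply PySem.List.sorted_id_eq_of_perm_of_pairwise
        · have : (n - rest).toNat = n.toNat - rest.toNat := by omega
          rw [this]
          exact List.perm_append_comm
        · rw [List.pairwise_append]
          refine ⟨?_, ?_, ?_⟩
          · exact List.pairwise_replicate.mpr (Or.inr le_rfl)
          · exact List.pairwise_replicate.mpr (Or.inr le_rfl)
          · intro a ha b hb
            rw [List.eq_of_mem_replicate ha, List.eq_of_mem_replicate hb]
            omega
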